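-- pv_equiv track=rewrite | github.com/ujin2021/IA | IA_ass/ass4.py | sentence
-- ===== SOURCE A (Python) =====
-- def sentence(basket):
--     basket.sort()
--     count_dict = {}
--     count_list = list()
--     result = 'There are '
--     count_num = {1: 'a', 2: 'two', 3: 'three'}
--     vowel = ['a', 'e', 'i', 'o', 'u']
--     for i in basket:
--         count_dict[i] = basket.count(i)
--
--     for key in count_dict:
--         temp_word = ''
--         if(count_dict[key] == 1):
--             if(key[0] in vowel):
--                 temp_word = count_num[count_dict[key]] + 'n ' + key
--             else:
--                 temp_word = count_num[count_dict[key]] + ' ' + key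
--
--         elif(count_dict[key] == 2 or count_dict[key] == 3):
--             temp_word = count_num[count_dict[key]] + ' ' + key + 's'
--
--         else:
--             temp_word = 'many ' + key + 's'
--
--         count_list.append(temp_word)
--
--     count_list[len(count_list)-1] = 'and ' + count_list[len(count_list)-1]
--     result = result + ', '.join(count_list) + ' in the basket.'
--
--     return result
-- ===== SOURCE B (Python) =====
-- def sentence(basket):
--     basket.sort()
--     words = []
--     rest = basket
--     while rest:
--         x = rest[0]
--         k = 1
--         while k < len(rest) and rest[k] == x:
--             k += 1
--         if k == 1:
--             word = ('an ' if x[0] in 'aeiou' else 'a ') + x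
--         elif k == 2:
--             word = 'two ' + x + 's'
--         elif k == 3:
--             word = 'three ' + x + 's'
--         else:
--             word = 'many ' + x + 's'
--         words.append(word)
--         rest = rest[k:]
--     words[-1] = 'and ' + words[-1]
--     return 'There are ' + ', '.join(words) + ' in the basket.'
-- ===== Notes on version B (the rewrite author's own statement) =====
-- stated objective: faster
-- what changed: B replaces A's dict built by calling basket.count(i) for every element plus a second loop over the dict with a single run-splitting pass over the sorted list that emits each group's word directly.
import Mathlib
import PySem

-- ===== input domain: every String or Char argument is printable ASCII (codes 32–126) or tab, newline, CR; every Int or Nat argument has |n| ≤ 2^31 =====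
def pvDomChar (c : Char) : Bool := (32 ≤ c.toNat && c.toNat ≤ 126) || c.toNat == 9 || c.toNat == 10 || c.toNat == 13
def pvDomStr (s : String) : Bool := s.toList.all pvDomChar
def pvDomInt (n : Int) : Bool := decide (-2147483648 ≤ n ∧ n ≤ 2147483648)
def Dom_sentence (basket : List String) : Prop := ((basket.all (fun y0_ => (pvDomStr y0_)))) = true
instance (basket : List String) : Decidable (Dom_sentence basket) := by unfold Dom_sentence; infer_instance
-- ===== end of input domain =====

-- B replaces A's quadratic per-element count() dict with one run-splitting pass over the
-- sorted list (O(n^2) → O(n log n)); equivalence is about the RETURN value (both A and B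
-- sort the caller's list in place; the Lean ports take the list by value).

-- ===== PORT A =====
-- loop body of A's second loop, extracted as a helper (same branches, same order)
def wordA (count_num : PySem.Dict Int String) (vowel : List Char) (key : String) (c : Int) : String :=
  if c == 1 then
    -- key[0]: IndexError on key = "" (excluded by Pre_); default is irrelevant under Pre_
    if vowel.contains ((PySem.Str.pyGet? key 0).getD ' ') then
      count_num.getD c "" ++ "n " ++ key
    else
      count_num.getD c "" ++ " " ++ key
  else if c == 2 || c == 3 then
    count_num.getD c "" ++ " " ++ key ++ "s"
  else
    "many " ++ key ++ "s"

def sentence (basket : List String) : String :=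
  let basket := PySem.List.sorted basket (fun x => x) false
  let count_num : PySem.Dict Int String := PySem.Dict.ofList [((1:Int),"a"),(2,"two"),(3,"three")]
  let vowel : List Char := ['a','e','i','o','u']
  let count_dict : PySem.Dict String Int :=
    basket.foldl (fun d i => d.insert i ((PySem.List.count basket i : Int))) PySem.Dict.empty
  let count_list : List String :=
    count_dict.keys.foldl (fun acc key => acc ++ [wordA count_num vowel key (count_dict.getD key 0)]) []
  let idx : Int := (count_list.length : Int) - 1
  -- count_list[len-1] = 'and ' + count_list[len-1]; IndexError on empty (excluded by Pre_)
  let count_list := PySem.List.pySetD count_list idx ("and " ++ PySem.List.pyGetD count_list idx "")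
  "There are " ++ PySem.Str.join ", " count_list ++ " in the basket."

-- ===== PORT B =====
def wordB (x : String) (k : Int) : String :=
  if k == 1 then
    (if "aeiou".toList.contains ((PySem.Str.pyGet? x 0).getD ' ') then "an " else "a ") ++ x
  else if k == 2 then "two " ++ x ++ "s"
  else if k == 3 then "three " ++ x ++ "s"
  else "many " ++ x ++ "s"

-- Source B's outer while: one word per run of equal adjacent elements
def runWords : List String → List String
  | [] => []
  | x :: t =>
    wordB x (((t.takeWhile (fun y => y == x)).length : Int) + 1) :: runWords (t.dropWhile (fun y => y == x))
termination_by l => l.length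
decreasing_by
  simp only [List.length_cons]
  exact Nat.lt_succ_of_le (t.length_dropWhile_le _)

def sentence_alt (basket : List String) : String :=
  let s := PySem.List.sorted basket (fun x => x) false
  let words := runWords s
  let words := PySem.List.pySetD words (-1) ("and " ++ PySem.List.pyGetD words (-1) "")
  "There are " ++ PySem.Str.join ", " words ++ " in the basket."

-- ===== PRECONDITION & SPEC =====
-- Pre_ excludes exactly the inputs where A raises: the empty basket (count_list[-1] → IndexError)
-- and baskets containing the empty string exactly once (key[0] → IndexError).
def Pre_sentence (basket : List String) : Prop :=
  basket ≠ [] ∧ ("" ∈ basket → basket.count "" ≠ 1)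
instance (basket : List String) : Decidable (Pre_sentence basket) := by unfold Pre_sentence; infer_instance
def pvWitness_sentence : List String := (["apple", "egg", "egg", "pear", "pear", "pear", "x", "x", "x", "x"])

def Spec_sentence (basket : List String) (out : String) : Prop := out = sentence_alt basket
instance (basket : List String) (out : String) : Decidable (Spec_sentence basket out) := by unfold Spec_sentence; infer_instance

-- ===== CLAIM (what is proved, stated in full; the proofs are below) =====
def Claim_equal_sentence : Prop := ∀ (basket : List String), Dom_sentence basket → Pre_sentence basket → Spec_sentence basket (sentence basket)

-- ===== LEMMAS AND PROOFS =====

theorem getD_fold_const {α ν : Type} [BEq α] [LawfulBEq α] [DecidableEq α] (f : α → ν) :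
    ∀ (l : List α) (d : PySem.Dict α ν) (k : α) (d0 : ν),
      (l.foldl (fun d x => d.insert x (f x)) d).getD k d0 = if k ∈ l then f k else d.getD k d0
  | [], d, k, d0 => by simp
  | x :: xs, d, k, d0 => by
      simp only [List.foldl_cons, getD_fold_const f xs, PySem.Dict.getD_insert, List.mem_cons]
      by_cases hk : k ∈ xs <;> by_cases hx : k = x <;> simp [hk, hx]

theorem discard_of_not_mem {α : Type} [BEq α] [LawfulBEq α] {s : List α} {x : α} (h : x ∉ s) :
    PySem.Set.discard s x = s := by
  rw [PySem.Set.discard, List.filter_eq_self]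
  intro a ha
  simp only [Bool.not_eq_eq_eq_not, Bool.not_true, beq_eq_false_iff_ne]
  exact fun h' => h (h' ▸ ha)

theorem ofList_run {α : Type} [BEq α] [LawfulBEq α] (x : α) :
    ∀ (run rest : List α), (∀ y ∈ run, y = x) →
      PySem.Set.ofList (x :: (run ++ rest)) = PySem.Set.ofList (x :: rest)
  | [], rest, _ => by simp
  | y :: run', rest, h => by
      have hy : y = x := h y (by simp)
      subst hy
      have ih := ofList_run y run' rest (fun z hz => h z (by simp [hz]))
      calc PySem.Set.ofList (y :: (y :: run' ++ rest))
          = y :: PySem.Set.discard (y :: PySem.Set.discard (PySem.Set.ofList (run' ++ rest)) y) y := by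
            rw [List.cons_append, PySem.Set.ofList_cons, PySem.Set.ofList_cons]
        _ = y :: PySem.Set.discard (PySem.Set.ofList (run' ++ rest)) y := by
            simp only [PySem.Set.discard, List.filter_cons, beq_self_eq_true, List.filter_filter]
            simp
        _ = PySem.Set.ofList (y :: (run' ++ rest)) := (PySem.Set.ofList_cons y _).symm
        _ = PySem.Set.ofList (y :: rest) := ih

theorem word_eq (key : String) (c : Int) :
    wordA (PySem.Dict.ofList [((1:Int),"a"),(2,"two"),(3,"three")]) ['a','e','i','o','u'] key c
      = wordB key c := by
  have h1 : (PySem.Dict.ofList [((1:Int),"a"),(2,"two"),(3,"three")]).getD 1 "" = "a" := by rfl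
  have h2 : (PySem.Dict.ofList [((1:Int),"a"),(2,"two"),(3,"three")]).getD 2 "" = "two" := by rfl
  have h3 : (PySem.Dict.ofList [((1:Int),"a"),(2,"two"),(3,"three")]).getD 3 "" = "three" := by rfl
  have hv : "aeiou".toList = ['a','e','i','o','u'] := by rfl
  unfold wordA wordB
  by_cases hc1 : c = 1
  · subst hc1
    simp only [beq_self_eq_true, if_true, h1, hv]
    by_cases hvow : (['a','e','i','o','u'] : List Char).contains ((PySem.Str.pyGet? key 0).getD ' ')
    · rw [if_pos hvow, if_pos hvow, String.append_assoc]; rfl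
    · rw [if_neg hvow, if_neg hvow, String.append_assoc]; rfl
  · by_cases hc2 : c = 2
    · subst hc2; simp [h2]
    · by_cases hc3 : c = 3
      · subst hc3; simp [h3]
      · simp [hc1, hc2, hc3]

theorem runWords_eq : ∀ (n : Nat) (s : List String), s.length ≤ n → s.Pairwise (· ≤ ·) →
    (PySem.Set.ofList s).map (fun k => wordB k ((s.count k : Int))) = runWords s
  | _, [], _, _ => by simp [runWords]
  | 0, x :: t, hn, _ => by simp at hn
  | Nat.succ n, x :: t, hn, hp => by
      have hsplit : t.takeWhile (fun y => y == x) ++ t.dropWhile (fun y => y == x) = t :=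
        List.takeWhile_append_dropWhile
      set run := t.takeWhile (fun y => y == x) with hrun_def
      set rest := t.dropWhile (fun y => y == x) with hrest_def
      have hrun : ∀ y ∈ run, y = x := by
        intro y hy
        have := List.mem_takeWhile_imp hy
        exact eq_of_beq this
      have hpt : t.Pairwise (· ≤ ·) := hp.of_cons
      have hxt : ∀ y ∈ t, x ≤ y := by
        intro y hy; exact (List.pairwise_cons.mp hp).1 y hy
      have hrest_sub : rest.Sublist t := List.dropWhile_sublist _
      have hprest : rest.Pairwise (· ≤ ·) := hpt.sublist hrest_sub
      have hxrest : x ∉ rest := by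
        intro hmem
        cases hr : rest with
        | nil => rw [hr] at hmem; simp at hmem
        | cons y rest' =>
          have hy_ne : (y == x) = false := by
            have := List.head?_dropWhile_not (fun y => y == x) t
            rw [← hrest_def, hr] at this
            simpa using this
          have hy_ne' : y ≠ x := by simpa using hy_ne
          rw [hr] at hmem
          rcases List.mem_cons.mp hmem with h | h
          · exact hy_ne' h.symm
          · have hyx : y ≤ x := by
              rw [hr] at hprest
              exact (List.pairwise_cons.mp hprest).1 x h
            have hxy : x ≤ y := hxt y (hrest_sub.mem (hr ▸ List.mem_cons_self))
            exact hy_ne' (le_antisymm hyx hxy)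
      have hcount_x : (x :: t).count x = run.length + 1 := by
        rw [List.count_cons_self, ← hsplit, List.count_append]
        rw [List.count_eq_length.mpr (fun b hb => (hrun b hb).symm),
            List.count_eq_zero.mpr hxrest]
      have hcount_k : ∀ k ∈ rest, (x :: t).count k = rest.count k := by
        intro k hk
        have hkx : k ≠ x := fun h => hxrest (h ▸ hk)
        have hkrun : k ∉ run := fun h => hkx (hrun k h)
        rw [List.count_cons_of_ne (Ne.symm hkx), ← hsplit, List.count_append,
            List.count_eq_zero.mpr hkrun, Nat.zero_add]
      have hofList : PySem.Set.ofList (x :: t) = x :: PySem.Set.ofList rest := by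
        rw [← hsplit]
        rw [ofList_run x run rest hrun, PySem.Set.ofList_cons,
            discard_of_not_mem (fun h => hxrest ((PySem.Set.mem_ofList _ _).mp h))]
      have hlen : rest.length ≤ n := by
        have h1 := hrest_sub.length_le
        simp only [List.length_cons] at hn
        omega
      have ih := runWords_eq n rest hlen hprest
      rw [hofList, List.map_cons]
      rw [runWords]
      congr 1
      · rw [hcount_x]; push_cast; ring_nf; rfl
      · rw [← ih]
        apply List.map_congr_left
        intro k hk
        rw [hcount_k k ((PySem.Set.mem_ofList _ _).mp hk)]

theorem pySetD_neg_one {α : Type} (l : List α) (v : α) (h : l ≠ []) :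
    PySem.List.pySetD l (-1) v = l.set (l.length - 1) v := by
  have hlen : 1 ≤ l.length := List.length_pos_iff.mpr h
  simp [PySem.List.pySetD, PySem.List.pySet?, PySem.List.pyIdx?, hlen]

theorem pySetD_len_sub_one {α : Type} (l : List α) (v : α) (h : l ≠ []) :
    PySem.List.pySetD l ((l.length : Int) - 1) v = l.set (l.length - 1) v := by
  have hlen : 1 ≤ l.length := List.length_pos_iff.mpr h
  have hcast : ((l.length : Int) - 1) = ((l.length - 1 : Nat) : Int) := by omega
  rw [hcast, PySem.List.pySetD_natCast]

theorem pyGetD_len_sub_one {α : Type} (l : List α) (d : α) (h : l ≠ []) :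
    PySem.List.pyGetD l ((l.length : Int) - 1) d = l.getLast h := by
  have hlen : 1 ≤ l.length := List.length_pos_iff.mpr h
  have hcast : ((l.length : Int) - 1) = ((l.length - 1 : Nat) : Int) := by omega
  rw [hcast, PySem.List.pyGetD_natCast, List.getLast_eq_getElem,
      List.getD_eq_getElem l d (by omega)]

-- ===== VERDICT (by name: the statement is the Claim_ definition above) =====
theorem sentence_spec : Claim_equal_sentence := by
  intro basket _ hpre
  unfold Spec_sentence sentence sentence_alt
  dsimp only
  obtain ⟨hne, _⟩ := hpre
  set s := PySem.List.sorted basket (fun x => x) false with hs_def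
  have hsne : s ≠ [] := fun h => hne ((PySem.List.sorted_eq_nil_iff _ _ _).mp h)
  have hpair : s.Pairwise (· ≤ ·) := PySem.List.sorted_pairwise basket (fun x => x)
  -- the dict's keys and values
  have hkeys : (s.foldl (fun d i => d.insert i ((PySem.List.count s i : Int))) PySem.Dict.empty).keys
      = PySem.Set.ofList s := by
    rw [PySem.Dict.keys_foldl_insert s (fun _ i => ((PySem.List.count s i : Int))) PySem.Dict.empty,
        PySem.Dict.keys_empty, PySem.Set.update_nil_left]
  -- A's word list equals B's
  have hwords : (s.foldl (fun d i => d.insert i ((PySem.List.count s i : Int))) PySem.Dict.empty).keys.foldl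
      (fun acc key => acc ++ [wordA (PySem.Dict.ofList [((1:Int),"a"),(2,"two"),(3,"three")]) ['a','e','i','o','u'] key
        ((s.foldl (fun d i => d.insert i ((PySem.List.count s i : Int))) PySem.Dict.empty).getD key 0)]) []
      = runWords s := by
    rw [PySem.List.foldl_append_singleton_eq_map, List.nil_append, hkeys]
    rw [← runWords_eq s.length s le_rfl hpair]
    apply List.map_congr_left
    intro k hk
    rw [getD_fold_const, if_pos ((PySem.Set.mem_ofList _ _).mp hk), word_eq, PySem.List.count_eq]
  rw [hwords]
  have hwne : runWords s ≠ [] := by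
    cases hs : s with
    | nil => exact absurd hs hsne
    | cons x t => rw [runWords]; exact List.cons_ne_nil _ _
  rw [pySetD_neg_one _ _ hwne, pySetD_len_sub_one _ _ hwne,
      pyGetD_len_sub_one _ _ hwne, PySem.List.pyGetD_neg_one _ _ hwne]
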